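-- pv_equiv track=rewrite | github.com/rassul3003/ds_and_algorithms | 2395-find-subarrays-with-equal-sum.py | findSubarrays_set
-- ===== SOURCE A (Python) =====
-- def findSubarrays_set(nums):
--     seen = set()
--     for i in range(len(nums)-1):
--         sum = nums[i] + nums[i+1]
--
--         if sum in seen:
--             return True
--         else:
--             seen.add(sum)
--
--     return False
-- ===== SOURCE B (Python) =====
-- def findSubarrays_set(nums):
--     s = sorted(nums[i] + nums[i + 1] for i in range(len(nums) - 1))
--     return any(x == y for x, y in zip(s, s[1:]))
-- ===== Notes on version B (the rewrite author's own statement) =====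
-- stated objective: alternative
-- what changed: B detects a repeated adjacent-pair sum by sorting the list of pair sums and scanning for two equal neighbours, instead of A's single pass with a hash set and early return.
import Mathlib
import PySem

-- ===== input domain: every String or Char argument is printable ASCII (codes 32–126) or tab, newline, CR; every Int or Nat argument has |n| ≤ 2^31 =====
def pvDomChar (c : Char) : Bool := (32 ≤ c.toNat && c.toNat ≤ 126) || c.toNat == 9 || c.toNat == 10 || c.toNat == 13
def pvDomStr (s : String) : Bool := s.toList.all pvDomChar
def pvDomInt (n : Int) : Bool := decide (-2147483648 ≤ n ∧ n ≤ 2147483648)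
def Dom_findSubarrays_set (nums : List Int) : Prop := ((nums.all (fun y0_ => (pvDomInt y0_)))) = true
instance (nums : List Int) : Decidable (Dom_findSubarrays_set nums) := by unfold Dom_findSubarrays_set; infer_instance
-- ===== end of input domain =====

-- B sorts the list of adjacent-pair sums and scans for two equal neighbours; A streams with a hash set and early return.

-- ===== PORT A =====
-- A's loop 'for i in range(len(nums)-1)' visits each adjacent pair in order; the
-- structural recursion below carries the same 'seen' set and takes the same branches.
def findSubarrays_set_go : List Int → PySem.Set Int → Bool
  | a :: b :: rest, seen =>
      let sum := a + b
      if PySem.Set.contains seen sum then true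
      else findSubarrays_set_go (b :: rest) (PySem.Set.add seen sum)
  | _, _ => false

def findSubarrays_set (nums : List Int) : Bool :=
  findSubarrays_set_go nums PySem.Set.empty

-- ===== PORT B =====
-- any(x == y for x, y in zip(s, s[1:])): scan consecutive elements for an equal pair
def pvAdjEq : List Int → Bool
  | x :: y :: rest => x == y || pvAdjEq (y :: rest)
  | _ => false

def findSubarrays_set_alt (nums : List Int) : Bool :=
  -- s = sorted(nums[i] + nums[i+1] for i in range(len(nums) - 1))
  let s := PySem.List.sorted
    ((PySem.List.pyRange 0 (nums.length - 1) 1).map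
      (fun i => (PySem.List.pyGetD nums i 0) + (PySem.List.pyGetD nums (i + 1) 0)))
    (fun x => x) false
  pvAdjEq s

-- ===== PRECONDITION & SPEC =====
def Spec_findSubarrays_set (nums : List Int) (out : Bool) : Prop := out = findSubarrays_set_alt nums
instance (nums : List Int) (out : Bool) : Decidable (Spec_findSubarrays_set nums out) := by unfold Spec_findSubarrays_set; infer_instance

-- ===== CLAIM =====
def Claim_equal_findSubarrays_set : Prop := ∀ (nums : List Int), Dom_findSubarrays_set nums → Spec_findSubarrays_set nums (findSubarrays_set nums)

-- ===== LEMMAS AND PROOFS =====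

-- the list of adjacent-pair sums
def pvSums : List Int → List Int
  | a :: b :: rest => (a + b) :: pvSums (b :: rest)
  | _ => []

theorem pvSums_range_nat : ∀ nums : List Int,
    (List.range (nums.length - 1)).map (fun i => nums.getD i 0 + nums.getD (i+1) 0) = pvSums nums
  | [] => rfl
  | [_] => rfl
  | a :: b :: t => by
      have ih := pvSums_range_nat (b :: t)
      simp only [List.length_cons] at ih ⊢
      rw [show t.length + 1 + 1 - 1 = t.length + 1 from rfl, List.range_succ_eq_map]
      simp only [List.map_cons, List.map_map] at ih ⊢
      rw [pvSums, ← ih]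
      simp [Function.comp]

theorem pvSums_eq_range (nums : List Int) :
    (PySem.List.pyRange 0 ((nums.length : Int) - 1) 1).map
      (fun i => (PySem.List.pyGetD nums i 0) + (PySem.List.pyGetD nums (i + 1) 0))
    = pvSums nums := by
  cases nums with
  | nil => decide
  | cons a t =>
      have h1 : ((a :: t).length : Int) - 1 = ((a :: t).length - 1 : Nat) := by
        simp
      rw [h1, PySem.List.pyRange_zero_natCast, List.map_map, ← pvSums_range_nat (a :: t)]
      apply List.map_congr_left
      intro i _
      show PySem.List.pyGetD (a :: t) (↑i) 0 + PySem.List.pyGetD (a :: t) ((↑i) + 1) 0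
        = (a :: t).getD i 0 + (a :: t).getD (i + 1) 0
      rw [show ((i:Int) + 1) = ((i+1 : Nat) : Int) by push_cast; ring]
      simp only [PySem.List.pyGetD_natCast]

-- A's loop returns true iff some sum repeats
theorem go_eq_nodup : ∀ (xs : List Int) (seen : PySem.Set Int), seen.Nodup →
    findSubarrays_set_go xs seen = !decide ((seen ++ pvSums xs).Nodup)
  | [], seen, h => by simp [findSubarrays_set_go, pvSums, h]
  | [a], seen, h => by simp [findSubarrays_set_go, pvSums, h]
  | a :: b :: rest, seen, h => by
      rw [findSubarrays_set_go]
      by_cases hc : (a + b) ∈ seen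
      · have hdup : ¬ (seen ++ (a + b) :: pvSums (b :: rest)).Nodup := by
          intro hnd
          exact (List.nodup_append.mp hnd).2.2 (a + b) hc (a + b) (by simp) rfl
        simp [PySem.Set.contains, hc, pvSums, hdup]
      · have hadd : PySem.Set.add seen (a + b) = seen ++ [a + b] := by
          simp [PySem.Set.add, PySem.Set.contains, hc]
        have hnd : (seen ++ [a + b]).Nodup :=
          List.Nodup.append h (List.nodup_singleton _)
            (by intro y hy hz; simp at hz; exact hc (hz ▸ hy))
        rw [if_neg (by simpa [PySem.Set.contains] using hc), hadd,
          go_eq_nodup (b :: rest) (seen ++ [a + b]) hnd]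
        have : seen ++ [a + b] ++ pvSums (b :: rest)
            = seen ++ pvSums (a :: b :: rest) := by
          simp [pvSums]
        rw [this]

-- on a (≤)-sorted list, an equal adjacent pair exists iff the list has a duplicate
theorem adjEq_eq_nodup : ∀ l : List Int, l.Pairwise (· ≤ ·) →
    pvAdjEq l = !decide l.Nodup
  | [], _ => by simp [pvAdjEq]
  | [a], _ => by simp [pvAdjEq]
  | a :: b :: t, h => by
      by_cases hab : a = b
      · subst hab
        simp [pvAdjEq]
      · have hp := List.pairwise_cons.mp h
        have hab' : a < b := lt_of_le_of_ne (hp.1 b (by simp)) hab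
        have hnotin : a ∉ b :: t := by
          intro hm
          rcases List.mem_cons.mp hm with rfl | hm
          · exact hab rfl
          · exact absurd (lt_of_lt_of_le hab'
              ((List.pairwise_cons.mp hp.2).1 a hm)) (lt_irrefl a)
        rw [pvAdjEq, adjEq_eq_nodup (b :: t) hp.2]
        simp [hab, List.nodup_cons, hnotin]

-- sorted pair sums have an equal neighbour iff the pair sums are not nodup
theorem adjEq_sorted (l : List Int) :
    pvAdjEq (PySem.List.sorted l (fun x => x) false) = !decide l.Nodup := by
  have hperm : (PySem.List.sorted l (fun x => x) false).Perm l :=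
    PySem.List.sorted_perm l (fun x => x) false
  rw [adjEq_eq_nodup _ (by simpa using PySem.List.sorted_pairwise l (fun x => x))]
  simp [hperm.nodup_iff]

-- ===== VERDICT =====
theorem findSubarrays_set_spec : Claim_equal_findSubarrays_set := by
  intro nums _
  unfold Spec_findSubarrays_set findSubarrays_set findSubarrays_set_alt
  rw [go_eq_nodup nums PySem.Set.empty (by simp [PySem.Set.empty])]
  rw [pvSums_eq_range, adjEq_sorted]
  simp
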